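-- pv_equiv track=rewrite | github.com/DILIP-SHEESH/Samsung-Prism | app.py | apply_unicode_watermark
-- ===== SOURCE A (Python) =====
-- def apply_unicode_watermark(generated_text, interval=5):
--     """
--     Adds an invisible Unicode watermark (zero-width joiner) to the generated text at frequent intervals.
--     The watermark is inserted after every 'interval' number of words.
--     """
--     # Unicode invisible characters (zero-width joiner)
--     unicode_watermark = "\u200C"  # Single invisible watermark character
--
--     words = generated_text.split()  # Split the text into words
--     watermarked_text = []
--
--     # Insert watermark after every 'interval' number of words
--     for i in range(0, len(words), interval):
--         # Add words to the list
--         watermarked_text.extend(words[i:i+interval])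
--         # Add a single invisible watermark after each group of words
--         if i + interval < len(words):  # Don't add watermark at the end if no additional words
--             watermarked_text.append(unicode_watermark)
--
--     # Join the words back into a string with single spaces between them
--     return " ".join(watermarked_text)
-- ===== SOURCE B (Python) =====
-- def apply_unicode_watermark(generated_text, interval=5):
--     words = generated_text.split()
--     last = len(words) - 1
--     watermarked = []
--     countdown = interval
--     for idx, word in enumerate(words):
--         watermarked.append(word)
--         countdown -= 1
--         if countdown == 0 and idx != last:
--             watermarked.append("\u200C")
--             countdown = interval
--     return " ".join(watermarked)
-- ===== Notes on version B (the rewrite author's own statement) =====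
-- stated objective: alternative
-- what changed: B makes a single per-word pass with a countdown counter that resets after each watermark, instead of A's stride-indexed range loop that slices out chunks and conditionally appends the marker.
-- intended difference: For a negative interval on text containing at least one word, A returns the empty string (its stride range is empty, silently dropping the whole text), while B returns the words joined by single spaces with no watermark, the intended value since no group of words ever completes. — e.g. on apply_unicode_watermark("a b", -1): A returns "", B returns "a b"
import Mathlib
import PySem

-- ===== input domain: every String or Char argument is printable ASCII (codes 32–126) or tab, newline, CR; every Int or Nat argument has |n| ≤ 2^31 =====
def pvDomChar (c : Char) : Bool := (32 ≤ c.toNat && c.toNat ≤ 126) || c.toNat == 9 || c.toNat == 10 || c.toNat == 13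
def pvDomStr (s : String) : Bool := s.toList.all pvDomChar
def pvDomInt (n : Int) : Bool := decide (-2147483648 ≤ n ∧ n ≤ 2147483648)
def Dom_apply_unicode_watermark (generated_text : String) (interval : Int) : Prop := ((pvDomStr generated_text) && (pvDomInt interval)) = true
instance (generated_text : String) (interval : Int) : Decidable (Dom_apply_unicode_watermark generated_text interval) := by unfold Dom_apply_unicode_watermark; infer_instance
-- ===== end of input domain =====

-- B replaces A's stride-indexed range-and-slice loop by a single per-word pass with a
-- countdown counter (objective: alternative); for negative intervals B keeps the text
-- unwatermarked where A silently drops it (see D_ below).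

-- ===== PORT A =====
def apply_unicode_watermark (generated_text : String) (interval : Int) : String :=
  let unicode_watermark : String := "\u200C"
  let words := PySem.Str.split₀ generated_text
  let watermarked_text : List String := []
  let watermarked_text :=
    (PySem.List.pyRange 0 (words.length : Int) interval).foldl
      (fun acc i =>
        let acc := acc ++ PySem.List.slice words (some i) (some (i + interval))
        if i + interval < (words.length : Int) then acc ++ [unicode_watermark] else acc)
      watermarked_text
  PySem.Str.join " " watermarked_text

-- ===== PORT B =====
-- B-side helper: the body of Source B's single for-loop over enumerate(words)
def pvMarkLoop (last reset : Int) (l : List (Int × String)) (st : List String × Int) :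
    List String × Int :=
  l.foldl (fun st p =>
      let watermarked := st.1 ++ [p.2]
      let countdown := st.2 - 1
      if countdown = 0 ∧ p.1 ≠ last then (watermarked ++ ["\u200C"], reset)
      else (watermarked, countdown))
    st

def apply_unicode_watermark_alt (generated_text : String) (interval : Int) : String :=
  let words := PySem.Str.split₀ generated_text
  let last : Int := (words.length : Int) - 1
  let fin := pvMarkLoop last interval (PySem.List.enumerate words 0) ([], interval)
  PySem.Str.join " " fin.1

-- ===== PRECONDITION & SPEC =====
-- Pre_ excludes interval = 0, where Python's range(0, len(words), 0) makes A raise ValueError.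
def Pre_apply_unicode_watermark (generated_text : String) (interval : Int) : Prop := interval ≠ 0
instance (generated_text : String) (interval : Int) : Decidable (Pre_apply_unicode_watermark generated_text interval) := by unfold Pre_apply_unicode_watermark; infer_instance
def pvWitness_apply_unicode_watermark : String × Int := ("hello there world again", 2)

-- For a negative interval on text containing at least one word, A returns "" (its stride range
-- is empty, silently dropping the whole text), while B returns the words joined by single
-- spaces with no watermark — the intended value, since no group of words ever completes.
def D_apply_unicode_watermark (generated_text : String) (interval : Int) : Prop :=
  interval < 0 ∧ PySem.Str.split₀ generated_text ≠ []
instance (generated_text : String) (interval : Int) : Decidable (D_apply_unicode_watermark generated_text interval) := by unfold D_apply_unicode_watermark; infer_instance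

def Spec_apply_unicode_watermark (generated_text : String) (interval : Int) (out : String) : Prop := ¬ D_apply_unicode_watermark generated_text interval → out = apply_unicode_watermark_alt generated_text interval
instance (generated_text : String) (interval : Int) (out : String) : Decidable (Spec_apply_unicode_watermark generated_text interval out) := by unfold Spec_apply_unicode_watermark; infer_instance

def pvDiffWitness_apply_unicode_watermark : String × Int := ("a b", -1)
def pvDiffWitnessOut_apply_unicode_watermark : String × String := ("", "a b")

-- ===== CLAIM (what is proved, stated in full; the proofs are below) =====
def Claim_unchanged_apply_unicode_watermark : Prop := ∀ (generated_text : String) (interval : Int), Dom_apply_unicode_watermark generated_text interval → Pre_apply_unicode_watermark generated_text interval → Spec_apply_unicode_watermark generated_text interval (apply_unicode_watermark generated_text interval)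
def Claim_changed_apply_unicode_watermark : Prop := Dom_apply_unicode_watermark (pvDiffWitness_apply_unicode_watermark.1) (pvDiffWitness_apply_unicode_watermark.2) ∧ Pre_apply_unicode_watermark (pvDiffWitness_apply_unicode_watermark.1) (pvDiffWitness_apply_unicode_watermark.2) ∧ D_apply_unicode_watermark (pvDiffWitness_apply_unicode_watermark.1) (pvDiffWitness_apply_unicode_watermark.2) ∧ apply_unicode_watermark (pvDiffWitness_apply_unicode_watermark.1) (pvDiffWitness_apply_unicode_watermark.2) = pvDiffWitnessOut_apply_unicode_watermark.1 ∧ apply_unicode_watermark_alt (pvDiffWitness_apply_unicode_watermark.1) (pvDiffWitness_apply_unicode_watermark.2) = pvDiffWitnessOut_apply_unicode_watermark.2 ∧ pvDiffWitnessOut_apply_unicode_watermark.1 ≠ pvDiffWitnessOut_apply_unicode_watermark.2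
def Claim_exact_apply_unicode_watermark : Prop := ∀ (generated_text : String) (interval : Int), Dom_apply_unicode_watermark generated_text interval → Pre_apply_unicode_watermark generated_text interval → D_apply_unicode_watermark generated_text interval → apply_unicode_watermark generated_text interval ≠ apply_unicode_watermark_alt generated_text interval

-- ===== LEMMAS AND PROOFS =====

theorem pvRange_pos_nil {a b s : Int} (hs : 0 < s) (h : b ≤ a) : PySem.List.pyRange a b s = [] := by
  rw [PySem.List.pyRange_of_pos _ _ hs, if_neg (not_lt.mpr h)]
  simp

theorem pvRange_neg_nil {a b s : Int} (hs : s < 0) (h : a ≤ b) : PySem.List.pyRange a b s = [] := by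
  simp [PySem.List.pyRange, hs.ne, not_lt.mpr hs.le, not_lt.mpr h]

theorem pvRange_pos_cons {a b s : Int} (hs : 0 < s) (hab : a < b) :
    PySem.List.pyRange a b s = a :: PySem.List.pyRange (a + s) b s := by
  have hs0 : s ≠ 0 := hs.ne'
  have hm : (b - a + s - 1) / s = (b - a - 1) / s + 1 := by
    have h1 : b - a + s - 1 = (b - a - 1) + 1 * s := by ring
    rw [h1, Int.add_mul_ediv_right _ _ hs0]
  rw [PySem.List.pyRange_of_pos _ _ hs, PySem.List.pyRange_of_pos _ _ hs, if_pos hab]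
  have hm' : (if a + s < b then ((b - (a + s) + s - 1) / s).toNat else 0) = ((b - a - 1) / s).toNat := by
    split_ifs with h
    · have : b - (a + s) + s - 1 = b - a - 1 := by ring
      rw [this]
    · have h0 : (b - a - 1) / s = 0 := Int.ediv_eq_zero_of_lt (by omega) (by omega)
      simp [h0]
  rw [hm']
  have hcnt : ((b - a + s - 1) / s).toNat = ((b - a - 1) / s).toNat + 1 := by
    have hq0 : 0 ≤ (b - a - 1) / s := Int.ediv_nonneg (by omega) hs.le
    rw [hm]; omega
  rw [hcnt, List.range_succ_eq_map]
  simp only [List.map_cons, List.map_map, Nat.cast_zero, mul_zero, add_zero, List.cons.injEq, true_and]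
  apply List.map_congr_left
  intro k _
  simp [Function.comp]
  ring

theorem pvFoldlBody (ws : List String) (iv : Int) (l : List Int) (init : List String) :
    l.foldl (fun acc i =>
        if i + iv < (ws.length : Int)
        then (acc ++ PySem.List.slice ws (some i) (some (i + iv))) ++ ["\u200C"]
        else acc ++ PySem.List.slice ws (some i) (some (i + iv))) init
    = init ++ l.flatMap (fun i => PySem.List.slice ws (some i) (some (i + iv)) ++
        (if i + iv < (ws.length : Int) then ["\u200C"] else [])) := by
  rw [show (fun (acc : List String) (i : Int) =>
      if i + iv < (ws.length : Int)
      then (acc ++ PySem.List.slice ws (some i) (some (i + iv))) ++ ["\u200C"]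
      else acc ++ PySem.List.slice ws (some i) (some (i + iv)))
      = fun acc i => acc ++ (PySem.List.slice ws (some i) (some (i + iv)) ++
          (if i + iv < (ws.length : Int) then ["\u200C"] else [])) from by
    funext acc i
    by_cases h : i + iv < (ws.length : Int) <;> simp [h]]
  exact PySem.List.foldl_append_eq_flatMap _ l init

theorem pvStrJoin_nil (sep : String) : PySem.Str.join sep [] = "" := by
  apply String.toList_inj.mp
  simp [PySem.Str.toList_join, PySem.Chars.join_nil]

theorem pvMarkLoop_nil (last reset : Int) (st : List String × Int) :
    pvMarkLoop last reset [] st = st := rfl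

theorem pvMarkLoop_cons (last reset i : Int) (w : String) (l : List (Int × String))
    (out : List String) (c : Int) :
    pvMarkLoop last reset ((i, w) :: l) (out, c) =
      pvMarkLoop last reset l
        (if c - 1 = 0 ∧ i ≠ last then (out ++ [w] ++ ["\u200C"], reset) else (out ++ [w], c - 1)) := by
  simp only [pvMarkLoop, List.foldl_cons]

theorem pvMarkLoop_append (last reset : Int) (l₁ l₂ : List (Int × String)) (st : List String × Int) :
    pvMarkLoop last reset (l₁ ++ l₂) st = pvMarkLoop last reset l₂ (pvMarkLoop last reset l₁ st) := by
  simp only [pvMarkLoop, List.foldl_append]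

-- a run of the loop during which the countdown never both hits zero and sits off the last index:
-- every word is appended, no marker, the countdown just decreases
theorem pvMarkLoop_noMark (last reset : Int) :
    ∀ (ys : List String) (a c : Int) (out : List String),
      (∀ j : Nat, j < ys.length → c - (j + 1) = 0 → a + j = last) →
      pvMarkLoop last reset (PySem.List.enumerate ys a) (out, c) = (out ++ ys, c - ys.length) := by
  intro ys
  induction ys with
  | nil => intro a c out _; simp [PySem.List.enumerate_nil, pvMarkLoop_nil]
  | cons w ys ih =>
    intro a c out H
    rw [PySem.List.enumerate_cons, pvMarkLoop_cons]
    have hbranch : ¬ (c - 1 = 0 ∧ a ≠ last) := by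
      rintro ⟨h0, hne⟩
      exact hne (by simpa using H 0 (by simp) (by omega))
    rw [if_neg hbranch, ih (a + 1) (c - 1) (out ++ [w]) (fun j hj h0 => by
      have := H (j + 1) (by simpa using Nat.succ_lt_succ hj) (by omega)
      push_cast at this ⊢
      omega)]
    simp [List.append_assoc]
    ring

-- a full chunk: exactly c words with the last one not at the last index — all words appended,
-- then one marker, and the countdown resets
theorem pvMarkLoop_chunk (last reset : Int) :
    ∀ (ys : List String) (a c : Int) (out : List String),
      0 < c → ys.length = c.toNat → a + c - 1 ≠ last →
      pvMarkLoop last reset (PySem.List.enumerate ys a) (out, c) = (out ++ ys ++ ["\u200C"], reset) := by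
  intro ys
  induction ys with
  | nil => intro a c out hc hlen _; simp at hlen; omega
  | cons w ys ih =>
    intro a c out hc hlen hne
    rw [PySem.List.enumerate_cons, pvMarkLoop_cons]
    by_cases hnil : ys = []
    · subst hnil
      have hc1 : c = 1 := by simp at hlen; omega
      rw [if_pos ⟨by omega, by omega⟩]
      simp [PySem.List.enumerate_nil, pvMarkLoop_nil]
    · have hlen2 : 2 ≤ ys.length + 1 := by
        cases ys with
        | nil => exact absurd rfl hnil
        | cons _ _ => simp
      have hc2 : 2 ≤ c := by simp at hlen; omega
      rw [if_neg (by rintro ⟨h0, _⟩; omega)]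
      rw [ih (a + 1) (c - 1) (out ++ [w]) (by omega) (by simp at hlen ⊢; omega) (by omega)]
      simp [List.append_assoc]

-- the main loop equivalence for a positive interval: B's counter pass over the suffix of the
-- words starting at index a produces exactly A's flattened chunks-with-markers list
theorem pvMain (ws : List String) (s : Int) (hs : 0 < s) :
    ∀ (k : Nat) (ys : List String) (a : Int) (out : List String),
      ys.length ≤ k → 0 ≤ a → ys = ws.drop a.toNat →
      (pvMarkLoop ((ws.length : Int) - 1) s (PySem.List.enumerate ys a) (out, s)).1 =
        out ++ (PySem.List.pyRange a (ws.length : Int) s).flatMap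
          (fun i => PySem.List.slice ws (some i) (some (i + s)) ++
            (if i + s < (ws.length : Int) then ["\u200C"] else [])) := by
  intro k
  induction k with
  | zero =>
    intro ys a out hk ha hdrop
    have hnil : ys = [] := List.eq_nil_of_length_eq_zero (by omega)
    subst hnil
    have hna : (ws.length : Int) ≤ a := by
      have := congrArg List.length hdrop
      simp [List.length_drop] at this
      omega
    rw [pvRange_pos_nil hs hna]
    simp [PySem.List.enumerate_nil, pvMarkLoop_nil]
  | succ k ih =>
    intro ys a out hk ha hdrop
    by_cases hnil : ys = []
    · subst hnil
      have hna : (ws.length : Int) ≤ a := by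
        have := congrArg List.length hdrop
        simp [List.length_drop] at this
        omega
      rw [pvRange_pos_nil hs hna]
      simp [PySem.List.enumerate_nil, pvMarkLoop_nil]
    · have hlenys : ys.length = ws.length - a.toNat := by
        have := congrArg List.length hdrop
        simpa [List.length_drop] using this
      have hlt : a < (ws.length : Int) := by
        have : 0 < ys.length := List.length_pos_iff.mpr hnil
        omega
      have hslice : PySem.List.slice ws (some a) (some (a + s)) = ys.take s.toNat := by
        rw [PySem.List.slice_toNat ws ha (by omega), hdrop]
        congr 1
        omega
      rw [pvRange_pos_cons hs hlt, List.flatMap_cons]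
      by_cases hend : a + s < (ws.length : Int)
      · -- a full chunk of s words followed by a marker, then the rest
        have hsplit : ys = ys.take s.toNat ++ ys.drop s.toNat := (List.take_append_drop _ _).symm
        rw [show PySem.List.enumerate ys a =
            PySem.List.enumerate (ys.take s.toNat) a ++
              PySem.List.enumerate (ys.drop s.toNat) (a + (ys.take s.toNat).length) from by
          conv_lhs => rw [hsplit]
          exact PySem.List.enumerate_append _ _ _]
        rw [pvMarkLoop_append]
        have htlen : (ys.take s.toNat).length = s.toNat := by
          simp [List.length_take]
          omega
        rw [pvMarkLoop_chunk _ _ _ _ _ _ hs htlen (by omega)]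
        rw [htlen]
        rw [ih (ys.drop s.toNat) (a + s.toNat) (out ++ ys.take s.toNat ++ ["\u200C"])
          (by simp [List.length_drop]; omega) (by omega)
          (by rw [hdrop, List.drop_drop]; congr 1; omega)]
        rw [if_pos hend, hslice]
        have hcast : ((a + s.toNat : Int)) = a + s := by omega
        rw [hcast]
        simp [List.append_assoc]
      · -- the final, possibly short, chunk: no marker
        rw [pvRange_pos_nil hs (by omega), if_neg hend]
        have htake : ys.take s.toNat = ys := List.take_of_length_le (by omega)
        rw [pvMarkLoop_noMark _ _ _ _ _ _ (fun j hj h0 => by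
          have hj' : (j : Int) = s - 1 := by omega
          omega)]
        simp [hslice, htake]

-- split() never produces an empty word
theorem pvSplitGo_ne_nil :
    ∀ (rest cur : List Char) (acc : List (List Char)),
      (∀ x ∈ acc, x ≠ []) → (∀ x ∈ PySem.Chars.split₀.go rest cur acc, x ≠ []) := by
  intro rest
  induction rest with
  | nil =>
    intro cur acc hacc x hx
    rw [PySem.Chars.split₀.go] at hx
    split at hx
    · exact hacc x (List.mem_reverse.mp hx)
    · rename_i hcur
      rcases List.mem_cons.mp (List.mem_reverse.mp hx) with h | h
      · subst h
        intro he
        exact hcur (by rw [List.isEmpty_iff]; exact List.reverse_eq_nil_iff.mp he)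
      · exact hacc x h
  | cons c rest ih =>
    intro cur acc hacc x hx
    rw [PySem.Chars.split₀.go] at hx
    split at hx
    · split at hx
      · exact ih [] acc hacc x hx
      · rename_i hcur
        refine ih [] (cur.reverse :: acc) ?_ x hx
        intro y hy
        rcases List.mem_cons.mp hy with h | h
        · subst h
          intro he
          exact hcur (by rw [List.isEmpty_iff]; exact List.reverse_eq_nil_iff.mp he)
        · exact hacc y h
    · exact ih (c :: cur) acc hacc x hx

theorem pvSplit_no_empty (t : String) : ∀ w ∈ PySem.Str.split₀ t, w ≠ "" := by
  intro w hw
  simp only [PySem.Str.split₀] at hw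
  rcases List.mem_map.mp hw with ⟨cs, hcs, hw'⟩
  have hne : cs ≠ [] := pvSplitGo_ne_nil t.toList [] [] (by simp) cs hcs
  intro he
  apply hne
  have : cs = String.toList (String.ofList cs) := by simp
  rw [hw', he] at this
  simpa using this

theorem pvJoin_words_ne_empty (ws : List String) (hne : ws ≠ []) (hno : ∀ w ∈ ws, w ≠ "") :
    PySem.Str.join " " ws ≠ "" := by
  cases ws with
  | nil => exact absurd rfl hne
  | cons w ws =>
    intro he
    have := congrArg String.toList he
    rw [PySem.Str.toList_join] at this
    cases ws with
    | nil =>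
      rw [List.map_singleton, PySem.Chars.join_singleton] at this
      exact hno w (by simp) (String.toList_inj.mp this)
    | cons v ws =>
      rw [List.map_cons, List.map_cons, PySem.Chars.join_cons_cons,
        show String.toList "" = [] from rfl] at this
      simp [List.append_eq_nil_iff] at this

-- evaluating B for a nonpositive interval: the countdown never reaches zero, so the words
-- are simply joined back
theorem pvAlt_nonpos (t : String) (s : Int) (hs : s ≤ 0) :
    apply_unicode_watermark_alt t s = PySem.Str.join " " (PySem.Str.split₀ t) := by
  simp only [apply_unicode_watermark_alt]
  rw [pvMarkLoop_noMark _ _ _ 0 _ _ (fun j _ h0 => by omega)]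
  simp

-- evaluating A for a negative interval: the stride range is empty
theorem pvA_neg (t : String) (s : Int) (hs : s < 0) : apply_unicode_watermark t s = "" := by
  simp only [apply_unicode_watermark]
  rw [pvRange_neg_nil hs (Int.natCast_nonneg _)]
  simp [pvStrJoin_nil]

-- ===== VERDICT (by name: the statements are the Claim_ definitions above) =====
theorem apply_unicode_watermark_spec : Claim_unchanged_apply_unicode_watermark := by
  intro generated_text interval _hdom hpre hnd
  show apply_unicode_watermark generated_text interval = apply_unicode_watermark_alt generated_text interval
  rcases lt_or_gt_of_ne hpre with hneg | hpos
  · -- interval < 0: ¬D_ forces the word list empty, both sides give ""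
    have hws : PySem.Str.split₀ generated_text = [] := by
      by_contra h
      exact hnd ⟨hneg, h⟩
    rw [pvA_neg _ _ hneg, pvAlt_nonpos _ _ hneg.le, hws, pvStrJoin_nil]
  · -- interval > 0: the two loops produce the same word-and-marker list
    simp only [apply_unicode_watermark, apply_unicode_watermark_alt]
    rw [pvFoldlBody, List.nil_append]
    congr 1
    exact (pvMain (PySem.Str.split₀ generated_text) interval hpos
      (PySem.Str.split₀ generated_text).length (PySem.Str.split₀ generated_text) 0 []
      le_rfl le_rfl (by simp)).symm

set_option maxRecDepth 4000 in
theorem apply_unicode_watermark_changed : Claim_changed_apply_unicode_watermark := by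
  unfold Claim_changed_apply_unicode_watermark; decide

theorem apply_unicode_watermark_tight : Claim_exact_apply_unicode_watermark := by
  intro generated_text interval _hdom _hpre hd
  rcases hd with ⟨hneg, hws⟩
  rw [pvA_neg _ _ hneg, pvAlt_nonpos _ _ hneg.le]
  exact fun h => pvJoin_words_ne_empty _ hws (pvSplit_no_empty _) h.symm
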